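-- pv_equiv track=rewrite | github.com/Arsen1302/Code-copy-detector | TestData/solutions/problem_771_2_1.py | solution_771_2_1
-- ===== SOURCE A (Python) =====
-- def solution_771_2_1(text: str) -> int:
--     n=len(text)-1
--     dp=[[-1 for i in range(n+1)] for j in range(n+1)]
--     def solution_771_2_2(start,end):
--         if start>end:
--             return 0
--         if dp[start][end]!=-1:
--             return dp[start][end]
--         best=1
--         l,r=start,end
--         mid=(r+l)//2
--         while r>mid:
--             chunk=end-r+1
--             if text[l:l+chunk]==text[r:end+1]:
--                 val=solution_771_2_2(l+chunk,r-1)+2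
--                 best=max(best,val)
--             r-=1
--         dp[start][end]=best
--         return dp[start][end]
--     return solution_771_2_2(0,n)
-- ===== SOURCE B (Python) =====
-- def solution_771_2_1(text: str) -> int:
--     # Greedy: repeatedly strip the SHORTEST matching prefix/suffix pair (provably optimal).
--     res = 0
--     i, j = 0, len(text)
--     k = 1
--     while i + k <= j - k:
--         if text[i:i + k] == text[j - k:j]:
--             res += 2
--             i += k
--             j -= k
--             k = 1
--         else:
--             k += 1
--     if i < j:
--         res += 1
--     return res
-- ===== Notes on version B (the rewrite author's own statement) =====
-- stated objective: faster
-- what changed: Replaces the memoized interval DP that tries every chunk length at every level with a single greedy two-pointer pass that always strips the shortest matching prefix/suffix pair (provably optimal).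
import Mathlib
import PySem

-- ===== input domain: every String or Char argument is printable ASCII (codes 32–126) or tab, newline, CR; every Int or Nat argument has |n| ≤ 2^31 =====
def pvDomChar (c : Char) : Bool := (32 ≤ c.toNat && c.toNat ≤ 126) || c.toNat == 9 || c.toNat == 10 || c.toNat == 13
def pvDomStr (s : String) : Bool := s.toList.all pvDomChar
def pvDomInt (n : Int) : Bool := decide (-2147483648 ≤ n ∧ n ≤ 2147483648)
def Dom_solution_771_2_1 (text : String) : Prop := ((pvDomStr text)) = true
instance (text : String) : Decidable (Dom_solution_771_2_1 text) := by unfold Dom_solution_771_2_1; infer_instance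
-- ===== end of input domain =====

-- B replaces A's memoized interval DP (all chunk lengths at every level) by a greedy two-pointer
-- pass stripping the shortest matching prefix/suffix pair; the greedy choice is proved optimal.

-- ===== PORT A =====
-- A's dp (a 2D list filled with -1) is modeled as a finite map defaulting to -1: every dp access of
-- A happens at indices 0 ≤ start ≤ end ≤ n, inside the table, so the map model is exact.
mutual
-- the inner recursive function solution_771_2_2 (memoized on dp)
def pvGoA (t : List Char) (start end_ : Int) (dp : PySem.Dict (Int × Int) Int) :
    Int × PySem.Dict (Int × Int) Int :=
  if _h1 : start > end_ then (0, dp)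
  else if PySem.Dict.getD dp (start, end_) (-1) ≠ -1 then
    (PySem.Dict.getD dp (start, end_) (-1), dp)
  else
    -- l = start; mid = (end_ + l) // 2 (recomputed inside the loop port)
    let (best, dp') := pvLoopA t start end_ end_ 1 dp
    -- dp[start][end] = best; return dp[start][end]
    (best, PySem.Dict.insert dp' (start, end_) best)
termination_by ((end_ - start).toNat, 1, 0)

-- the while-loop over r inside solution_771_2_2 (l = start, mid recomputed from start,end)
def pvLoopA (t : List Char) (start end_ r best : Int) (dp : PySem.Dict (Int × Int) Int) :
    Int × PySem.Dict (Int × Int) Int :=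
  -- l = start, mid = (end_ + start) // 2 written inline
  if _h2 : r > PySem.Int.floordiv (end_ + start) 2 then
    let chunk := end_ - r + 1
    if PySem.List.slice t (some start) (some (start + chunk)) == PySem.List.slice t (some r) (some (end_ + 1)) then
      -- totality guard (always true on reachable states: the loop keeps start ≤ r ≤ end_)
      if _h3 : start ≤ end_ ∧ r ≤ end_ then
        let (v, dp') := pvGoA t (start + chunk) (r - 1) dp
        pvLoopA t start end_ (r - 1) (max best (v + 2)) dp'
      else (best, dp)
    else pvLoopA t start end_ (r - 1) best dp
  else (best, dp)
termination_by ((end_ - start).toNat, 0, (r - PySem.Int.floordiv (end_ + start) 2).toNat)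
decreasing_by
  · refine Prod.Lex.left _ _ ?_
    have h4 := PySem.Int.floordiv_mul_add_mod (end_ + start) 2
    have h5 := PySem.Int.mod_nonneg (end_ + start) (b := 2) (by norm_num)
    have h6 := PySem.Int.mod_lt (end_ + start) (b := 2) (by norm_num)
    omega
  · refine Prod.Lex.right _ ?_
    refine Prod.Lex.right _ ?_
    omega
  · refine Prod.Lex.right _ ?_
    refine Prod.Lex.right _ ?_
    omega
end

def solution_771_2_1 (text : String) : Int :=
  let t := text.toList
  let n : Int := PySem.List.len t - 1
  (pvGoA t 0 n PySem.Dict.empty).1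

-- ===== PORT B =====
-- the while loop of B: state (i, j, k, res); returns the final (i, j, res)
def pvLoopB (t : List Char) (i j k res : Int) : Int × Int × Int :=
  if _h : i + k ≤ j - k then
    if PySem.List.slice t (some i) (some (i + k)) == PySem.List.slice t (some (j - k)) (some j) then
      pvLoopB t (i + k) (j - k) 1 (res + 2)
    else
      pvLoopB t i j (k + 1) res
  else (i, j, res)
termination_by (j - i + 1 - 2 * k).toNat
decreasing_by
  · omega
  · omega

def solution_771_2_1_alt (text : String) : Int :=
  let t := text.toList
  let (i, j, res) := pvLoopB t 0 (PySem.List.len t) 1 0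
  if i < j then res + 1 else res

-- ===== PRECONDITION & SPEC =====
def Spec_solution_771_2_1 (text : String) (out : Int) : Prop := out = solution_771_2_1_alt text
instance (text : String) (out : Int) : Decidable (Spec_solution_771_2_1 text out) := by unfold Spec_solution_771_2_1; infer_instance

-- ===== CLAIM (what is proved, stated in full; the proofs are below) =====
def Claim_equal_solution_771_2_1 : Prop := ∀ (text : String), Dom_solution_771_2_1 text → Spec_solution_771_2_1 text (solution_771_2_1 text)

-- ===== LEMMAS AND PROOFS =====

-- The common specification: pvF s = the maximal number of chunks in a palindromic chunk
-- decomposition of s (A's recurrence, written cleanly on lists with Nat indices).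

/-- the middle of `s` after removing a matching prefix/suffix pair of length `c` -/
def pvMid (s : List Char) (c : Nat) : List Char := (s.drop c).take (s.length - 2 * c)

/-- chunk length `c` is a valid matching prefix/suffix pair of `s` (an abbrev, so
    decidability is inferred from the conjuncts) -/
abbrev pvIsMatch (s : List Char) (c : Nat) : Prop :=
  1 ≤ c ∧ 2 * c ≤ s.length ∧ s.take c = s.drop (s.length - c)

theorem pvMid_length (s : List Char) (c : Nat) :
    (pvMid s c).length = s.length - 2 * c := by
  simp [pvMid]; omega

mutual
/-- A's recurrence: 0 on the empty string, else the max of 1 and `pvF (mid) + 2`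
    over all matching chunk lengths `c ∈ [1, |s|/2]`. -/
def pvF (s : List Char) : Nat :=
  if s.length = 0 then 0 else pvScan s 1 (s.length / 2)
termination_by (s.length, s.length + 1)

/-- the scan over candidate chunk lengths `c, c+1, …, c+k-1` -/
def pvScan (s : List Char) (c k : Nat) : Nat :=
  match k with
  | 0 => 1
  | k + 1 =>
    if h : pvIsMatch s c then
      max (pvF (pvMid s c) + 2) (pvScan s (c + 1) k)
    else pvScan s (c + 1) k
termination_by (s.length, k)
decreasing_by
  · refine Prod.Lex.left _ _ ?_
    have h1 := h.1; have h2 := h.2.1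
    have := pvMid_length s c
    omega
  · exact Prod.Lex.right _ (by omega)
  · exact Prod.Lex.right _ (by omega)
end

/-- first matching chunk length among `c, c+1, …, c+k-1` -/
def pvMinM (s : List Char) (c k : Nat) : Option Nat :=
  match k with
  | 0 => none
  | k + 1 => if pvIsMatch s c then some c else pvMinM s (c + 1) k

theorem pvMinM_isMatch (s : List Char) (c k c0 : Nat) (h : pvMinM s c k = some c0) :
    pvIsMatch s c0 ∧ c ≤ c0 ∧ c0 < c + k := by
  induction k generalizing c with
  | zero => simp [pvMinM] at h
  | succ k ih =>
    rw [pvMinM] at h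
    split_ifs at h with hm
    · cases h; exact ⟨hm, le_refl _, by omega⟩
    · obtain ⟨a, b, d⟩ := ih (c + 1) h
      exact ⟨a, by omega, by omega⟩

/-- the greedy: strip the shortest matching chunk, recurse -/
def pvG (s : List Char) : Nat :=
  match h : pvMinM s 1 (s.length / 2) with
  | none => if s.length = 0 then 0 else 1
  | some c => pvG (pvMid s c) + 2
termination_by s.length
decreasing_by
  have hm := pvMinM_isMatch s 1 (s.length / 2) c h
  have h2 := hm.1.2.1
  have := pvMid_length s c
  omega

-- characterization of a matching chunk at the character level (via getElem?)
theorem pvMatch_char {s : List Char} {c : Nat} (h1 : 1 ≤ c) (h2 : 2 * c ≤ s.length) :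
    (s.take c = s.drop (s.length - c)) ↔ ∀ i : Nat, i < c → s[i]? = s[s.length - c + i]? := by
  constructor
  · intro h i hi
    have := congrArg (fun l : List Char => l[i]?) h
    simpa [List.getElem?_take, List.getElem?_drop, hi] using this
  · intro h
    apply List.ext_getElem?_iff.mpr
    intro i
    by_cases hi : i < c
    · simpa [List.getElem?_take, List.getElem?_drop, hi] using h i hi
    · rw [List.getElem?_eq_none_iff.mpr (by simp; omega),
          List.getElem?_eq_none_iff.mpr (by simp; omega)]

theorem pvIsMatch_char {s : List Char} {c : Nat} (h : pvIsMatch s c) :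
    ∀ i : Nat, i < c → s[i]? = s[s.length - c + i]? :=
  (pvMatch_char h.1 h.2.1).mp h.2.2

theorem pvMid_getElem? (s : List Char) (c : Nat) (i : Nat) (hi : i < s.length - 2 * c) :
    (pvMid s c)[i]? = s[c + i]? := by
  simp [pvMid, List.getElem?_drop, hi]

-- L1 core: two matches with the smaller one < half of the larger produce a still smaller match
theorem pvOverlap_match {s : List Char} {c0 c : Nat} (hm0 : pvIsMatch s c0) (hmc : pvIsMatch s c)
    (hlt : c0 < c) (hover : c < 2 * c0) : pvIsMatch s (2 * c0 - c) := by
  have h01 := hm0.1; have h02 := hm0.2.1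
  have hc1 := hmc.1; have hc2 := hmc.2.1
  set L := s.length with hL
  set b := 2 * c0 - c with hb
  set p := c - c0 with hp
  have h0 := pvIsMatch_char hm0
  have h1 := pvIsMatch_char hmc
  -- period p on the prefix of length c
  have hper : ∀ i : Nat, i < c0 → s[i]? = s[p + i]? := by
    intro i hi
    rw [h0 i hi]
    have : L - c0 + i = L - c + (p + i) := by omega
    rw [this, ← h1 (p + i) (by omega)]
  refine ⟨by omega, by omega, (pvMatch_char (by omega) (by omega)).mpr ?_⟩
  intro j hj
  have e1 : L - b + j = L - c + (2 * p + j) := by omega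
  have e2 : s[(L - b + j : Nat)]? = s[(2 * p + j : Nat)]? := by
    rw [e1, ← h1 (2 * p + j) (by omega)]
  have e3 : s[(2 * p + j : Nat)]? = s[(p + j : Nat)]? := by
    have h5 := hper (p + j) (by omega)
    have e : 2 * p + j = p + (p + j) := by omega
    rw [e]
    exact h5.symm
  have e4 : s[(j : Nat)]? = s[(p + j : Nat)]? := hper j (by omega)
  rw [e4, ← e3, ← e2]

-- composition of middles
theorem pvMid_comp (s : List Char) (a b : Nat) : pvMid (pvMid s a) b = pvMid s (a + b) := by
  apply List.ext_getElem?_iff.mpr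
  intro i
  have hla := pvMid_length s a
  have hlb := pvMid_length (pvMid s a) b
  have hlab := pvMid_length s (a + b)
  by_cases hi : i < s.length - 2 * (a + b)
  · have h1 : (pvMid (pvMid s a) b)[i]? = (pvMid s a)[b + i]? := by
      apply pvMid_getElem?
      omega
    rw [h1, pvMid_getElem? s a (b + i) (by omega), pvMid_getElem? s (a + b) i hi]
    congr 1; omega
  · rw [List.getElem?_eq_none_iff.mpr (by omega), List.getElem?_eq_none_iff.mpr (by omega)]

-- the two peeled chunks
theorem pvPeel_outer {s : List Char} {c0 c : Nat} (hm0 : pvIsMatch s c0) (hmc : pvIsMatch s c)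
    (hle : 2 * c0 < c) : pvIsMatch (pvMid s c0) (c - 2 * c0) := by
  have h01 := hm0.1; have h02 := hm0.2.1
  have hc1 := hmc.1; have hc2 := hmc.2.1
  set L := s.length
  have hlen := pvMid_length s c0
  have h1 := pvIsMatch_char hmc
  refine ⟨by omega, by omega, (pvMatch_char (by omega) (by omega)).mpr ?_⟩
  intro i hi
  rw [pvMid_getElem? s c0 i (by omega), hlen,
      pvMid_getElem? s c0 ((L - 2 * c0) - (c - 2 * c0) + i) (by omega)]
  have e1 : (c0 + ((L - 2 * c0) - (c - 2 * c0) + i) : Nat) = L - c + (c0 + i) := by omega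
  rw [e1, ← h1 (c0 + i) (by omega)]

theorem pvPeel_inner {s : List Char} {c0 c : Nat} (hm0 : pvIsMatch s c0) (hmc : pvIsMatch s c)
    (hle : 2 * c0 ≤ c) : pvIsMatch (pvMid s (c - c0)) c0 := by
  have h01 := hm0.1; have h02 := hm0.2.1
  have hc1 := hmc.1; have hc2 := hmc.2.1
  set L := s.length
  have hlen := pvMid_length s (c - c0)
  have h0 := pvIsMatch_char hm0
  have h1 := pvIsMatch_char hmc
  refine ⟨by omega, by omega, (pvMatch_char (by omega) (by omega)).mpr ?_⟩
  intro i hi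
  rw [pvMid_getElem? s (c - c0) i (by omega), hlen,
      pvMid_getElem? s (c - c0) ((L - 2 * (c - c0)) - c0 + i) (by omega)]
  have eA : s[(c - c0 + i : Nat)]? = s[(i : Nat)]? := by
    have e1 : (L - c0 + i : Nat) = L - c + (c - c0 + i) := by omega
    rw [h1 (c - c0 + i) (by omega), ← e1, ← h0 i (by omega)]
  have e2 : ((c - c0) + ((L - 2 * (c - c0)) - c0 + i) : Nat) = L - c + i := by omega
  rw [eA, e2, ← h1 i (by omega)]

-- scan lemmas (A's inner maximum, Nat-valued)
theorem pvScan_ge_one (s : List Char) (c k : Nat) : 1 ≤ pvScan s c k := by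
  induction k generalizing c with
  | zero => simp [pvScan]
  | succ k ih =>
    rw [pvScan]
    split_ifs with h
    · have := ih (c + 1); omega
    · exact ih (c + 1)

theorem pvScan_ge (s : List Char) (k c0 c : Nat) (h1 : c0 ≤ c) (h2 : c < c0 + k)
    (hm : pvIsMatch s c) : pvF (pvMid s c) + 2 ≤ pvScan s c0 k := by
  induction k generalizing c0 with
  | zero => omega
  | succ k ih =>
    rw [pvScan]
    rcases Nat.eq_or_lt_of_le h1 with heq | hlt
    · subst heq
      rw [dif_pos hm]
      omega
    · split_ifs with h
      · have := ih (c0 + 1) (by omega) (by omega); omega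
      · exact ih (c0 + 1) (by omega) (by omega)

theorem pvScan_le (s : List Char) (k c0 B : Nat) (hB : 1 ≤ B)
    (h : ∀ c, c0 ≤ c → c < c0 + k → pvIsMatch s c → pvF (pvMid s c) + 2 ≤ B) :
    pvScan s c0 k ≤ B := by
  induction k generalizing c0 with
  | zero => simpa [pvScan] using hB
  | succ k ih =>
    rw [pvScan]
    split_ifs with hm
    · have h1 := h c0 (le_refl _) (by omega) hm
      have h2 := ih (c0 + 1) (fun c a b hc => h c (by omega) (by omega) hc)
      omega
    · exact ih (c0 + 1) (fun c a b hc => h c (by omega) (by omega) hc)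

theorem pvIsMatch_bounds {s : List Char} {c : Nat} (h : pvIsMatch s c) :
    1 ≤ c ∧ c ≤ s.length / 2 := ⟨h.1, by have := h.2.1; omega⟩

theorem pvF_eq_scan {s : List Char} (h : s.length ≠ 0) : pvF s = pvScan s 1 (s.length / 2) := by
  rw [pvF, if_neg h]

theorem pvF_ge {s : List Char} {c : Nat} (hm : pvIsMatch s c) : pvF (pvMid s c) + 2 ≤ pvF s := by
  have hb := pvIsMatch_bounds hm
  have hb1 := hb.1; have hb2 := hb.2
  have h := pvScan_ge s (s.length / 2) 1 c hb1 (by omega) hm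
  rwa [← pvF_eq_scan (by omega)] at h

theorem pvF_pos {s : List Char} (h : s.length ≠ 0) : 1 ≤ pvF s := by
  rw [pvF_eq_scan h]; exact pvScan_ge_one s 1 (s.length / 2)

-- L2: peeling the shorter match never loses value
theorem pvPeel {s : List Char} {c0 c : Nat} (hm0 : pvIsMatch s c0) (hmc : pvIsMatch s c)
    (hle : 2 * c0 ≤ c) : pvF (pvMid s c) ≤ pvF (pvMid s c0) := by
  have hz : pvIsMatch (pvMid s (c - c0)) c0 := pvPeel_inner hm0 hmc hle
  have hz2 : pvF (pvMid (pvMid s (c - c0)) c0) + 2 ≤ pvF (pvMid s (c - c0)) := pvF_ge hz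
  rw [pvMid_comp] at hz2
  have e1 : c - c0 + c0 = c := by omega
  rw [e1] at hz2
  rcases Nat.eq_or_lt_of_le hle with heq | hlt
  · have : c - c0 = c0 := by omega
    rw [this] at hz2; omega
  · have hy : pvIsMatch (pvMid s c0) (c - 2 * c0) := pvPeel_outer hm0 hmc hlt
    have hy2 : pvF (pvMid (pvMid s c0) (c - 2 * c0)) + 2 ≤ pvF (pvMid s c0) := pvF_ge hy
    rw [pvMid_comp] at hy2
    have e2 : c0 + (c - 2 * c0) = c - c0 := by omega
    rw [e2] at hy2
    omega

theorem pvMinM_eq_none (s : List Char) (c k : Nat) (h : pvMinM s c k = none) :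
    ∀ c', c ≤ c' → c' < c + k → ¬ pvIsMatch s c' := by
  induction k generalizing c with
  | zero => omega
  | succ k ih =>
    rw [pvMinM] at h
    split_ifs at h with hm
    intro c' a b hc
    rcases Nat.eq_or_lt_of_le a with heq | hlt
    · subst heq; exact hm hc
    · exact ih (c + 1) h c' (by omega) (by omega) hc

theorem pvMinM_min (s : List Char) (c k c0 : Nat) (h : pvMinM s c k = some c0) :
    ∀ c', c ≤ c' → c' < c0 → ¬ pvIsMatch s c' := by
  induction k generalizing c with
  | zero => simp [pvMinM] at h
  | succ k ih =>
    rw [pvMinM] at h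
    split_ifs at h with hm
    · cases h; omega
    · intro c' a b hc
      rcases Nat.eq_or_lt_of_le a with heq | hlt
      · subst heq; exact hm hc
      · exact ih (c + 1) h c' (by omega) b hc

theorem pvG_eq_pvF (s : List Char) : pvG s = pvF s := by
  have main : ∀ n (s : List Char), s.length ≤ n → pvG s = pvF s := by
    intro n
    induction n with
    | zero =>
      intro s hs
      have h0 : s.length = 0 := by omega
      rw [pvG, pvF, if_pos h0]
      have h2 : s.length / 2 = 0 := by omega
      rw [h2]
      simp [pvMinM, h0]
    | succ n ih =>
      intro s hs
      rw [pvG]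
      split
      · next hnone =>
        rcases Nat.eq_zero_or_pos s.length with h0 | h0
        · rw [pvF, if_pos h0, if_pos h0]
        · rw [if_neg (by omega), pvF_eq_scan (by omega)]
          have hno := pvMinM_eq_none s 1 (s.length / 2) hnone
          have hle : pvScan s 1 (s.length / 2) ≤ 1 := by
            apply pvScan_le s _ _ _ (le_refl _)
            intro c a b hc
            exact absurd hc (hno c a b)
          have := pvScan_ge_one s 1 (s.length / 2)
          omega
      · next c0 hsome =>
        obtain ⟨hm0, _, _⟩ := pvMinM_isMatch s 1 (s.length / 2) c0 hsome
        have hmin : ∀ c', pvIsMatch s c' → c0 ≤ c' := by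
          intro c' hc'
          by_contra hlt
          exact pvMinM_min s 1 (s.length / 2) c0 hsome c' (pvIsMatch_bounds hc').1
            (by omega) hc'
        have hlen0 : s.length ≠ 0 := by
          have := hm0.2.1; have := hm0.1; omega
        have hFs : pvF s = pvF (pvMid s c0) + 2 := by
          apply le_antisymm
          · rw [pvF_eq_scan hlen0]
            apply pvScan_le
            · have := pvF_pos (s := s) hlen0; omega
            · intro c a b hc
              have hc0c := hmin c hc
              rcases Nat.eq_or_lt_of_le hc0c with heq | hlt
              · subst heq; omega
              · have h2c : 2 * c0 ≤ c := by
                  by_contra hov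
                  have hb := pvOverlap_match hm0 hc hlt (by omega)
                  have := hmin _ hb
                  omega
                have := pvPeel hm0 hc h2c
                omega
          · exact pvF_ge hm0
        rw [hFs]
        have hlenmid : (pvMid s c0).length < s.length := by
          have := pvMid_length s c0
          have := hm0.1; have := hm0.2.1
          omega
        rw [ih (pvMid s c0) (by omega)]
  exact main s.length s (le_refl _)

-- ===== port correctness =====

/-- the Python slice t[a:b] (for 0 ≤ a ≤ b) -/
def pvSub (t : List Char) (a b : Int) : List Char :=
  (t.drop a.toNat).take (b - a).toNat

theorem pvSub_length (t : List Char) (a b : Int) (ha : 0 ≤ a) (hab : a ≤ b)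
    (hb : b ≤ (t.length : Int)) : (pvSub t a b).length = (b - a).toNat := by
  simp [pvSub]; omega

theorem pvSub_getElem? (t : List Char) (a b : Int) (i : Nat) (ha : 0 ≤ a)
    (hi : (i : Int) < b - a) : (pvSub t a b)[i]? = t[a.toNat + i]? := by
  have : i < (b - a).toNat := by omega
  simp [pvSub, List.getElem?_drop, this]

theorem pvSub_all (t : List Char) : pvSub t 0 (t.length : Int) = t := by
  simp [pvSub]

theorem pvSub_take (t : List Char) (a b : Int) (c : Nat) (ha : 0 ≤ a)
    (hc : (c : Int) ≤ b - a) : (pvSub t a b).take c = (t.drop a.toNat).take c := by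
  rw [pvSub, List.take_take, min_eq_left (by omega : c ≤ (b - a).toNat)]

theorem pvSub_drop (t : List Char) (a b : Int) (c : Nat) (ha : 0 ≤ a)
    (hc : (c : Int) ≤ b - a) (hb : b ≤ (t.length : Int)) :
    (pvSub t a b).drop ((pvSub t a b).length - c) = (t.drop (b - c).toNat).take c := by
  have hL : (pvSub t a b).length = (b - a).toNat := pvSub_length t a b ha (by omega) hb
  rw [pvSub, List.drop_take, List.drop_drop]
  rw [pvSub] at hL
  rw [hL]
  congr 1 <;> first | omega | (congr 1 <;> omega)

theorem pvSliceEq_iff (t : List Char) (a b : Int) (c : Nat) (ha : 0 ≤ a)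
    (hab : a + 2 * (c : Int) ≤ b) (hb : b ≤ (t.length : Int)) :
    ((PySem.List.slice t (some a) (some (a + (c : Int))) ==
        PySem.List.slice t (some (b - (c : Int))) (some b)) = true) ↔
      (pvSub t a b).take c = (pvSub t a b).drop ((pvSub t a b).length - c) := by
  rw [beq_iff_eq]
  rw [PySem.List.slice_toNat t ha (by omega), PySem.List.slice_toNat t (by omega) (by omega)]
  rw [pvSub_take t a b c ha (by omega), pvSub_drop t a b c ha (by omega) hb]
  have e1 : (a + (c : Int)).toNat - a.toNat = c := by omega
  have e2 : b.toNat - (b - (c : Int)).toNat = c := by omega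
  rw [e1, e2]

theorem pvSub_mid (t : List Char) (a b : Int) (c : Nat) (ha : 0 ≤ a)
    (hab : a + 2 * (c : Int) ≤ b) (hb : b ≤ (t.length : Int)) :
    pvMid (pvSub t a b) c = pvSub t (a + (c : Int)) (b - (c : Int)) := by
  apply List.ext_getElem?_iff.mpr
  intro i
  have hL : (pvSub t a b).length = (b - a).toNat := pvSub_length t a b ha (by omega) hb
  have hM := pvMid_length (pvSub t a b) c
  by_cases hi : (i : Int) < (b - (c : Int)) - (a + (c : Int))
  · rw [pvMid_getElem? _ c i (by omega), pvSub_getElem? t a b (c + i) ha (by omega),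
      pvSub_getElem? t (a + (c : Int)) (b - (c : Int)) i (by omega) hi]
    congr 1
    omega
  · rw [List.getElem?_eq_none_iff.mpr (by omega), List.getElem?_eq_none_iff.mpr]
    have := pvSub_length t (a + (c : Int)) (b - (c : Int)) (by omega) (by omega) (by omega)
    omega

-- ===== B-port correctness =====

/-- the value the greedy loop still adds when chunk lengths below `k` are already ruled out -/
def pvGAux (s : List Char) (k : Nat) : Nat :=
  match pvMinM s k (s.length / 2 + 1 - k) with
  | some c => pvG (pvMid s c) + 2
  | none => if s.length = 0 then 0 else 1

theorem pvGAux_one (s : List Char) : pvGAux s 1 = pvG s := by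
  rw [pvGAux, pvG]
  have e : s.length / 2 + 1 - 1 = s.length / 2 := by omega
  rw [e]
  rcases hm : pvMinM s 1 (s.length / 2) with _ | c <;> simp only [hm]

theorem pvGAux_of_match (s : List Char) (k : Nat) (hk : pvIsMatch s k) :
    pvGAux s k = pvG (pvMid s k) + 2 := by
  have hb := pvIsMatch_bounds hk
  have e : s.length / 2 + 1 - k = (s.length / 2 - k) + 1 := by omega
  rw [pvGAux, e, pvMinM, if_pos hk]

theorem pvGAux_of_not_match (s : List Char) (k : Nat) (hk1 : 1 ≤ k) (hk2 : 2 * k ≤ s.length)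
    (hk : ¬ pvIsMatch s k) : pvGAux s k = pvGAux s (k + 1) := by
  have e : s.length / 2 + 1 - k = (s.length / 2 + 1 - (k + 1)) + 1 := by omega
  rw [pvGAux, e, pvMinM, if_neg hk, pvGAux]

theorem pvGAux_of_over (s : List Char) (k : Nat) (hk : s.length / 2 < k) :
    pvGAux s k = if s.length = 0 then 0 else 1 := by
  have e : s.length / 2 + 1 - k = 0 := by omega
  rw [pvGAux, e, pvMinM]

theorem pvLoopB_spec (t : List Char) :
    ∀ (N : Nat) (i j k res : Int), (j - i + 1 - 2 * k).toNat ≤ N →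
    0 ≤ i → i ≤ j → j ≤ (t.length : Int) → 1 ≤ k →
    (∀ c : Nat, 1 ≤ c → (c : Int) < k → ¬ pvIsMatch (pvSub t i j) c) →
    (pvLoopB t i j k res).2.2 + (if (pvLoopB t i j k res).1 < (pvLoopB t i j k res).2.1 then 1 else 0)
      = res + (pvGAux (pvSub t i j) k.toNat : Nat) := by
  intro N
  induction N with
  | zero =>
    intro i j k res hN hi hij hj hk hfail
    rw [pvLoopB, dif_neg (by omega)]
    have hL : (pvSub t i j).length = (j - i).toNat := pvSub_length t i j hi hij hj
    rw [pvGAux_of_over _ _ (by omega)]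
    rw [hL]
    dsimp only
    split_ifs <;> push_cast <;> omega
  | succ N ih =>
    intro i j k res hN hi hij hj hk hfail
    rw [pvLoopB]
    have hL : (pvSub t i j).length = (j - i).toNat := pvSub_length t i j hi hij hj
    by_cases hg : i + k ≤ j - k
    · rw [dif_pos hg]
      have hkc : ((k.toNat : Nat) : Int) = k := by omega
      have hslice := pvSliceEq_iff t i j k.toNat hi (by omega) hj
      rw [hkc] at hslice
      by_cases heq : (PySem.List.slice t (some i) (some (i + k)) ==
          PySem.List.slice t (some (j - k)) (some j)) = true
      · rw [if_pos heq]
        have hm : pvIsMatch (pvSub t i j) k.toNat :=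
          ⟨by omega, by rw [hL]; omega, hslice.mp heq⟩
        have hrec := ih (i + k) (j - k) 1 (res + 2) (by omega) (by omega) (by omega)
          (by omega) (by omega) (by intro c hc1 hc2; omega)
        rw [hrec]
        have hmid : pvSub t (i + k) (j - k) = pvMid (pvSub t i j) k.toNat := by
          rw [pvSub_mid t i j k.toNat hi (by omega) hj, hkc]
        rw [hmid]
        have h1 : (1 : Int).toNat = 1 := rfl
        rw [h1, pvGAux_one, pvGAux_of_match _ _ hm]
        push_cast
        ring
      · rw [if_neg heq]
        have hnm : ¬ pvIsMatch (pvSub t i j) k.toNat := by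
          intro hm
          exact heq (hslice.mpr hm.2.2)
        have hrec := ih i j (k + 1) res (by omega) hi hij hj (by omega) (by
          intro c hc1 hc2
          rcases Nat.lt_or_ge c k.toNat with h | h
          · exact hfail c hc1 (by omega)
          · have : c = k.toNat := by omega
            rw [this]
            exact hnm)
        rw [hrec]
        have e : (k + 1).toNat = k.toNat + 1 := by omega
        rw [e, pvGAux_of_not_match _ _ (by omega) (by rw [hL]; omega) hnm]
    · rw [dif_neg hg]
      rw [pvGAux_of_over _ _ (by omega), hL]
      dsimp only
      split_ifs <;> push_cast <;> omega

theorem portB_eq_pvG (text : String) :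
    solution_771_2_1_alt text = (pvG text.toList : Nat) := by
  unfold solution_771_2_1_alt
  simp only [PySem.List.len_eq]
  have hspec := pvLoopB_spec text.toList ((text.toList.length : Int) + 1 - 2).toNat
    0 (text.toList.length : Int) 1 0 (by omega) (by omega) (by omega) (by omega) (by omega)
    (by intro c hc1 hc2; omega)
  rw [pvSub_all] at hspec
  have h1 : (1 : Int).toNat = 1 := rfl
  rw [h1, pvGAux_one] at hspec
  rcases hp : pvLoopB text.toList 0 (text.toList.length : Int) 1 0 with ⟨i, j, res⟩
  rw [hp] at hspec
  dsimp only at hspec ⊢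
  split_ifs at hspec ⊢ with h <;> omega

-- ===== A-port correctness =====

def pvInvA (t : List Char) (dp : PySem.Dict (Int × Int) Int) : Prop :=
  ∀ p v, PySem.Dict.get? dp p = some v →
    0 ≤ p.1 ∧ p.1 ≤ p.2 ∧ p.2 ≤ (t.length : Int) - 1 ∧
      v = (pvF (pvSub t p.1 (p.2 + 1)) : Nat)

theorem pvLoopA_spec (t : List Char) (start end_ : Int)
    (hs : 0 ≤ start) (hse : start ≤ end_) (he : end_ ≤ (t.length : Int) - 1)
    (IHgo : ∀ (s' e' : Int) (dp' : PySem.Dict (Int × Int) Int),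
      (e' - s').toNat < (end_ - start).toNat → 0 ≤ s' → e' ≤ (t.length : Int) - 1 →
      pvInvA t dp' →
      (pvGoA t s' e' dp').1 = (pvF (pvSub t s' (e' + 1)) : Nat) ∧
        pvInvA t (pvGoA t s' e' dp').2) :
    ∀ (K : Nat) (r best : Int) (dp : PySem.Dict (Int × Int) Int),
      (r - PySem.Int.floordiv (end_ + start) 2).toNat ≤ K →
      PySem.Int.floordiv (end_ + start) 2 ≤ r → r ≤ end_ → 1 ≤ best → pvInvA t dp →
      (pvLoopA t start end_ r best dp).1
        = max best ((pvScan (pvSub t start (end_ + 1)) (end_ - r + 1).toNat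
            (r - PySem.Int.floordiv (end_ + start) 2).toNat : Nat) : Int) ∧
        pvInvA t (pvLoopA t start end_ r best dp).2 := by
  have hmd := PySem.Int.floordiv_mul_add_mod (end_ + start) 2
  have hm0 := PySem.Int.mod_nonneg (end_ + start) (b := 2) (by norm_num)
  have hm1 := PySem.Int.mod_lt (end_ + start) (b := 2) (by norm_num)
  set m : Int := PySem.Int.floordiv (end_ + start) 2 with hmdef
  have hsL : (pvSub t start (end_ + 1)).length = (end_ + 1 - start).toNat :=
    pvSub_length t start (end_ + 1) hs (by omega) (by omega)
  intro K
  induction K with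
  | zero =>
    intro r best dp hK hmr hre hbest hinv
    rw [pvLoopA, dif_neg (by omega)]
    have h0 : (r - m).toNat = 0 := by omega
    rw [h0]
    refine ⟨?_, hinv⟩
    simp only [pvScan]
    omega
  | succ K ih =>
    intro r best dp hK hmr hre hbest hinv
    by_cases hr : r > m
    · rw [pvLoopA, dif_pos (by rw [← hmdef]; exact hr)]
      have hc0 : ((end_ - r + 1).toNat : Int) = end_ - r + 1 := by omega
      have hKs : (r - m).toNat = (r - 1 - m).toNat + 1 := by omega
      have hslice := pvSliceEq_iff t start (end_ + 1) (end_ - r + 1).toNat hs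
        (by omega) (by omega)
      rw [hc0] at hslice
      have er : end_ + 1 - (end_ - r + 1) = r := by ring
      have ea : start + (end_ - r + 1) = start + (end_ - r + 1) := rfl
      rw [er] at hslice
      have hlenc : 2 * (end_ - r + 1).toNat ≤ (pvSub t start (end_ + 1)).length := by
        rw [hsL]; omega
      by_cases heq : (PySem.List.slice t (some start) (some (start + (end_ - r + 1))) ==
          PySem.List.slice t (some r) (some (end_ + 1))) = true
      · rw [if_pos heq]
        have hmatch : pvIsMatch (pvSub t start (end_ + 1)) (end_ - r + 1).toNat :=
          ⟨by omega, hlenc, hslice.mp heq⟩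
        have hmeas : (r - 1 - (start + (end_ - r + 1))).toNat < (end_ - start).toNat := by
          omega
        have hA := IHgo (start + (end_ - r + 1)) (r - 1) dp hmeas (by omega) (by omega) hinv
        have er1 : r - 1 + 1 = r := by ring
        rw [er1] at hA
        have hmid : pvMid (pvSub t start (end_ + 1)) (end_ - r + 1).toNat
            = pvSub t (start + (end_ - r + 1)) r := by
          have := pvSub_mid t start (end_ + 1) (end_ - r + 1).toNat hs (by omega) (by omega)
          rw [hc0, er] at this
          exact this
        rw [dif_pos ⟨hse, hre⟩]
        rcases hp : pvGoA t (start + (end_ - r + 1)) (r - 1) dp with ⟨v, dp2⟩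
        rw [hp] at hA
        dsimp only at hA ⊢
        have hrec := ih (r - 1) (max best (v + 2)) dp2 (by omega) (by omega) (by omega)
          (by omega) hA.2
        refine ⟨?_, hrec.2⟩
        rw [hrec.1, hKs]
        have hsc : pvScan (pvSub t start (end_ + 1)) (end_ - r + 1).toNat ((r - 1 - m).toNat + 1)
            = max (pvF (pvMid (pvSub t start (end_ + 1)) (end_ - r + 1).toNat) + 2)
                (pvScan (pvSub t start (end_ + 1)) ((end_ - r + 1).toNat + 1) (r - 1 - m).toNat) := by
          rw [pvScan, dif_pos hmatch]
        have ec : (end_ - (r - 1) + 1).toNat = (end_ - r + 1).toNat + 1 := by omega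
        rw [ec]
        rw [hsc, hmid]
        have hv := hA.1
        push_cast
        omega
      · rw [if_neg heq]
        have hnm : ¬ pvIsMatch (pvSub t start (end_ + 1)) (end_ - r + 1).toNat := by
          intro hmm
          exact heq (hslice.mpr hmm.2.2)
        have hrec := ih (r - 1) best dp (by omega) (by omega) (by omega) hbest hinv
        refine ⟨?_, hrec.2⟩
        rw [hrec.1, hKs]
        have hsc : pvScan (pvSub t start (end_ + 1)) (end_ - r + 1).toNat ((r - 1 - m).toNat + 1)
            = pvScan (pvSub t start (end_ + 1)) ((end_ - r + 1).toNat + 1) (r - 1 - m).toNat := by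
          rw [pvScan, dif_neg hnm]
        have ec : (end_ - (r - 1) + 1).toNat = (end_ - r + 1).toNat + 1 := by omega
        rw [ec, hsc]
    · rw [pvLoopA, dif_neg (by rw [← hmdef]; exact hr)]
      have h0 : (r - m).toNat = 0 := by omega
      rw [h0]
      refine ⟨?_, hinv⟩
      simp only [pvScan]
      omega

theorem pvGoA_spec (t : List Char) :
    ∀ (N : Nat) (start end_ : Int) (dp : PySem.Dict (Int × Int) Int),
    (end_ - start).toNat ≤ N → 0 ≤ start → end_ ≤ (t.length : Int) - 1 → pvInvA t dp →
    (pvGoA t start end_ dp).1 = (pvF (pvSub t start (end_ + 1)) : Nat) ∧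
      pvInvA t (pvGoA t start end_ dp).2 := by
  intro N
  induction N using Nat.strong_induction_on with
  | _ N IHN =>
    intro start end_ dp hN hs he hinv
    rw [pvGoA]
    by_cases h1 : start > end_
    · rw [dif_pos h1]
      have hempty : pvSub t start (end_ + 1) = [] := by
        have : (end_ + 1 - start).toNat = 0 := by omega
        simp [pvSub, this]
      rw [hempty]
      exact ⟨by rw [pvF]; simp, hinv⟩
    · rw [dif_neg h1]
      have hL : (pvSub t start (end_ + 1)).length = (end_ + 1 - start).toNat :=
        pvSub_length t start (end_ + 1) hs (by omega) (by omega)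
      by_cases h2 : PySem.Dict.getD dp (start, end_) (-1) ≠ -1
      · rw [if_pos h2]
        rcases hq : PySem.Dict.get? dp (start, end_) with _ | v
        · exfalso
          apply h2
          rw [PySem.Dict.getD_eq_get?_getD, hq]
          rfl
        · have hv := hinv (start, end_) v hq
          have : PySem.Dict.getD dp (start, end_) (-1) = v := by
            rw [PySem.Dict.getD_eq_get?_getD, hq]
            rfl
          rw [this]
          exact ⟨hv.2.2.2, hinv⟩
      · rw [if_neg h2]
        have hmd := PySem.Int.floordiv_mul_add_mod (end_ + start) 2
        have hm0 := PySem.Int.mod_nonneg (end_ + start) (b := 2) (by norm_num)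
        have hm1 := PySem.Int.mod_lt (end_ + start) (b := 2) (by norm_num)
        have hloop := pvLoopA_spec t start end_ hs (by omega) he
          (by
            intro s' e' dp' hlt hs' he' hinv'
            exact IHN (e' - s').toNat (by omega) s' e' dp' (le_refl _) hs' he' hinv')
          (end_ - PySem.Int.floordiv (end_ + start) 2).toNat end_ 1 dp (le_refl _)
          (by omega) (le_refl _) (by omega) hinv
        rcases hp : pvLoopA t start end_ end_ 1 dp with ⟨best, dp2⟩
        rw [hp] at hloop
        dsimp only at hloop ⊢
        have he1 : (end_ - end_ + 1).toNat = 1 := by norm_num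
        have hhalf : (end_ - PySem.Int.floordiv (end_ + start) 2).toNat
            = (pvSub t start (end_ + 1)).length / 2 := by
          rw [hL]; omega
        rw [he1, hhalf] at hloop
        have hFs : pvF (pvSub t start (end_ + 1))
            = pvScan (pvSub t start (end_ + 1)) 1 ((pvSub t start (end_ + 1)).length / 2) :=
          pvF_eq_scan (by rw [hL]; omega)
        have hge1 := pvScan_ge_one (pvSub t start (end_ + 1)) 1
          ((pvSub t start (end_ + 1)).length / 2)
        have hbest : best = (pvF (pvSub t start (end_ + 1)) : Nat) := by
          rw [hloop.1, hFs]
          omega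
        refine ⟨hbest, ?_⟩
        intro p v hq
        rw [PySem.Dict.get?_insert] at hq
        split_ifs at hq with hpk
        · subst hpk
          cases hq
          exact ⟨hs, by omega, he, hbest⟩
        · exact hloop.2 p v hq

theorem portA_eq_pvF (text : String) :
    solution_771_2_1 text = (pvF text.toList : Nat) := by
  unfold solution_771_2_1
  simp only [PySem.List.len_eq]
  have hinv : pvInvA text.toList PySem.Dict.empty := by
    intro p v hq
    rw [PySem.Dict.get?_empty] at hq
    cases hq
  have h := pvGoA_spec text.toList ((text.toList.length : Int)).toNat 0
    ((text.toList.length : Int) - 1) PySem.Dict.empty (by omega) (by omega) (by omega) hinv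
  have e : (text.toList.length : Int) - 1 + 1 = (text.toList.length : Int) := by ring
  rw [e, pvSub_all] at h
  exact h.1

-- ===== VERDICT (by name: the statement is the Claim_ definition above) =====
theorem solution_771_2_1_spec : Claim_equal_solution_771_2_1 := by
  intro text _
  unfold Spec_solution_771_2_1
  rw [portA_eq_pvF, portB_eq_pvG, pvG_eq_pvF]
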